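-- pv_equiv track=rewrite | github.com/RazinSufian/Data-Structures-and-Algorithum | DSA/Core_concepts/hash_table.py | hash_index_creator
-- ===== SOURCE A (Python) =====
-- def hash_index_creator(data,len_of_hashARRA):
--     value=0
--     step=1
--     for i in data:
--         if step==1:
--             if i ==type(str):
--                 value+=ord(i)
--             else:
--                 value+=i
--             step+=1
--         else:
--             if i ==type(str):
--                 value-=ord(i)
--             else:
--                 value-=i
--             step-=1
--     value=abs(value)%len_of_hashARRA
--     return value
-- ===== SOURCE B (Python) =====
-- def hash_index_creator(data, len_of_hashARRA):
--     # even-index elements are added, odd-index subtracted; then abs % table size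
--     value = sum(data[::2]) - sum(data[1::2])
--     return abs(value) % len_of_hashARRA
-- ===== Notes on version B (the rewrite author's own statement) =====
-- stated objective: simpler
-- what changed: Replaces the step-toggle state machine with a map-free formulation: sum of the even-index slice minus sum of the odd-index slice, then abs %.
import Mathlib
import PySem

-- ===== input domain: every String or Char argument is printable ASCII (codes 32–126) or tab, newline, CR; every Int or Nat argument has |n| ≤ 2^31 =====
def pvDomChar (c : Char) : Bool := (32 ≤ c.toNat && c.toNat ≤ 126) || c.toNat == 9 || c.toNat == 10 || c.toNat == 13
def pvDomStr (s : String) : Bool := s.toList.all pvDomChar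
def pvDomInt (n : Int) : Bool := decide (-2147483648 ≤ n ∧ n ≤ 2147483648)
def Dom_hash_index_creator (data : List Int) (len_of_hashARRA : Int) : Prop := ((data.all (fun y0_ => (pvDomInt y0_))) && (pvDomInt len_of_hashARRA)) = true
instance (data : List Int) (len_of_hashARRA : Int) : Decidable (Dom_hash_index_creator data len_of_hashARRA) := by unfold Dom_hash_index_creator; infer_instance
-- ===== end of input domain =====

-- B replaces A's step-toggle accumulator with sum(data[::2]) - sum(data[1::2]) (objective: simpler).
-- ===== PORT A =====
-- NOTE: on ints the Python guard `i == type(str)` is always False (an int never equals a type),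
-- so on this List Int domain the `ord` branch is dead and only the else arms are ported.
def hash_index_creator (data : List Int) (len_of_hashARRA : Int) : Int :=
  let vs := data.foldl
    (fun (vs : Int × Int) i =>
      if vs.2 = 1 then (vs.1 + i, vs.2 + 1) else (vs.1 - i, vs.2 - 1))
    (0, 1)
  PySem.Int.mod |vs.1| len_of_hashARRA

-- ===== PORT B =====
def hash_index_creator_alt (data : List Int) (len_of_hashARRA : Int) : Int :=
  let evens := (PySem.List.slice? data none none 2).getD []      -- data[::2]
  let odds  := (PySem.List.slice? data (some 1) none 2).getD []  -- data[1::2]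
  PySem.Int.mod |evens.sum - odds.sum| len_of_hashARRA

-- ===== PRECONDITION & SPEC =====
-- Pre_ excludes only len_of_hashARRA = 0, where Python's `%` raises ZeroDivisionError.
def Pre_hash_index_creator (data : List Int) (len_of_hashARRA : Int) : Prop := len_of_hashARRA ≠ 0
instance (data : List Int) (len_of_hashARRA : Int) : Decidable (Pre_hash_index_creator data len_of_hashARRA) := by unfold Pre_hash_index_creator; infer_instance
def pvWitness_hash_index_creator : List Int × Int := ([1, 2, 3], 5)
def Spec_hash_index_creator (data : List Int) (len_of_hashARRA : Int) (out : Int) : Prop := out = hash_index_creator_alt data len_of_hashARRA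
instance (data : List Int) (len_of_hashARRA : Int) (out : Int) : Decidable (Spec_hash_index_creator data len_of_hashARRA out) := by unfold Spec_hash_index_creator; infer_instance

-- ===== CLAIM (what is proved, stated in full; the proofs are below) =====
def Claim_equal_hash_index_creator : Prop := ∀ (data : List Int) (len_of_hashARRA : Int), Dom_hash_index_creator data len_of_hashARRA → Pre_hash_index_creator data len_of_hashARRA → Spec_hash_index_creator data len_of_hashARRA (hash_index_creator data len_of_hashARRA)

-- ===== LEMMAS AND PROOFS =====

-- alternating sum (even indices +, odd indices -), two elements at a time
def pvAltSum : List Int → Int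
  | [] => 0
  | [x] => x
  | x :: y :: r => x - y + pvAltSum r

-- even-index elements of a list
def pvEvens : List Int → List Int
  | [] => []
  | [x] => [x]
  | x :: _ :: r => x :: pvEvens r

theorem pvEvens_cons (a : Int) (r : List Int) : pvEvens (a :: r) = a :: pvEvens r.tail := by
  cases r <;> simp [pvEvens]

theorem pvFold_eq_altSum (xs : List Int) : ∀ v : Int,
    (xs.foldl (fun (vs : Int × Int) i =>
      if vs.2 = 1 then (vs.1 + i, vs.2 + 1) else (vs.1 - i, vs.2 - 1)) (v, 1)).1
      = v + pvAltSum xs := by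
  induction xs using pvAltSum.induct with
  | case1 => simp [pvAltSum]
  | case2 x => intro v; simp [pvAltSum, List.foldl]
  | case3 x y r ih =>
      intro v
      simp only [List.foldl]
      norm_num
      rw [ih]
      simp [pvAltSum]; ring

theorem pvSlice2_eq_evens (xs : List Int) :
    PySem.List.slice? xs none none 2 = some (pvEvens xs) := by
  have key : ∀ xs : List Int,
      List.filterMap (fun k => xs[((2 : Int) * ↑k).toNat]?) (List.range (((xs.length : Int) + 1) / 2).toNat)
        = pvEvens xs := by
    intro xs
    induction xs using pvEvens.induct with
    | case1 => simp [pvEvens]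
    | case2 x => simp [pvEvens]
    | case3 x y r ih =>
        have hc : ((((x :: y :: r).length : Int) + 1) / 2).toNat
            = (((r.length : Int) + 1) / 2).toNat + 1 := by
          simp only [List.length_cons]; push_cast; omega
        rw [hc, List.range_succ_eq_map]
        simp only [List.filterMap_cons, List.filterMap_map]
        have h0 : ((x :: y :: r)[((2 : Int) * (0 : Nat)).toNat]?) = some x := by norm_num
        rw [h0]
        have harg : (fun k : Nat => (x :: y :: r)[((2 : Int) * ↑(k + 1)).toNat]?)
            = (fun k : Nat => r[((2 : Int) * ↑k).toNat]?) := by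
          funext k
          have : ((2 : Int) * ↑(k + 1)).toNat = ((2 : Int) * ↑k).toNat + 2 := by
            push_cast; omega
          rw [this]
          simp
        simp only [Function.comp_def]
        rw [show (fun k : Nat => (x :: y :: r)[((2:Int) * ↑(k + 1)).toNat]?) = (fun k : Nat => r[((2:Int) * ↑k).toNat]?) from harg]
        rw [ih]
        rfl
  simp only [PySem.List.slice?, PySem.List.sliceIndices]
  norm_num
  have hcount : (if 0 < xs.length then (((xs.length : Int) + 2 - 1) / 2).toNat else 0)
      = (((xs.length : Int) + 1) / 2).toNat := by
    split_ifs with h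
    · omega
    · have h0 : xs.length = 0 := by omega
      simp [h0]
  rw [hcount]
  exact key xs

theorem pvSlice2_one_eq_evens_tail (xs : List Int) :
    PySem.List.slice? xs (some 1) none 2 = some (pvEvens xs.tail) := by
  cases xs with
  | nil => simp [PySem.List.slice?, PySem.List.sliceIndices, pvEvens]
  | cons x r =>
      have h := pvSlice2_eq_evens r
      simp only [PySem.List.slice?, PySem.List.sliceIndices] at h ⊢
      norm_num at h ⊢
      rw [← h]
      have harg : (fun k : Nat => (x :: r)[((1 : Int) + 2 * ↑k).toNat]?)
          = (fun k : Nat => r[((2 : Int) * ↑k).toNat]?) := by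
        funext k
        have hk : ((1 : Int) + 2 * ↑k).toNat = ((2 : Int) * ↑k).toNat + 1 := by omega
        rw [hk]
        simp
      rw [harg]

theorem pvEvens_sub_tail (xs : List Int) :
    (pvEvens xs).sum - (pvEvens xs.tail).sum = pvAltSum xs := by
  induction xs using pvAltSum.induct with
  | case1 => simp [pvEvens, pvAltSum]
  | case2 x => simp [pvEvens, pvAltSum]
  | case3 x y r ih =>
      simp only [pvEvens, List.tail_cons, pvAltSum]
      rw [pvEvens_cons y r]
      simp only [List.sum_cons]
      omega

-- ===== VERDICT (by name: the statement is the Claim_ definition above) =====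
theorem hash_index_creator_spec : Claim_equal_hash_index_creator := by
  intro data len _ _
  unfold Spec_hash_index_creator hash_index_creator hash_index_creator_alt
  rw [pvSlice2_eq_evens, pvSlice2_one_eq_evens_tail]
  simp only [Option.getD_some]
  rw [pvEvens_sub_tail, pvFold_eq_altSum data 0]
  norm_num
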